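-- pv_equiv track=rewrite | github.com/tessyjonburica/Group-50 | EduResourceEvaluator/curriculum_checker.py | _topic_matches_content
-- ===== SOURCE A (Python) =====
-- from typing import Dict, List, Any, Set
--
-- def _topic_matches_content(topic: str, content_keywords: Set[str]) -> bool:
--     """
--     Check if a topic is mentioned in the content.
--
--     Args:
--         topic: Topic to check
--         content_keywords: Set of keywords from content
--
--     Returns:
--         bool: True if topic is found in content, False otherwise
--     """
--     # Split topic into individual words
--     topic_words = topic.lower().split()
--
--     # Check if any topic word appears in content keywords
--     for word in topic_words:
--         if word in content_keywords:
--             return True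
--
--     # Also check for exact topic match
--     if topic.lower() in content_keywords:
--         return True
--
--     # Check for partial matches (e.g., "addition" matches "addition facts")
--     for keyword in content_keywords:
--         if topic.lower() in keyword or keyword in topic.lower():
--             return True
--
--     return False
-- ===== SOURCE B (Python) =====
-- def _topic_matches_content(topic: str, content_keywords) -> bool:
--     # Single pass: every split-word of t is a substring of t, and t is a
--     # substring of itself, so A's first two phases are subsumed by the
--     # bidirectional substring scan.
--     t = topic.lower()
--     return any(t in kw or kw in t for kw in content_keywords)
-- ===== Notes on version B (the rewrite author's own statement) =====
-- stated objective: simpler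
-- what changed: Collapsed A's three phases (word-membership loop, exact-match check, bidirectional substring loop) into one pass over the keywords, since the first two checks are implied by the substring scan (every split word of t, and t itself, are substrings of t).
import Mathlib
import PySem

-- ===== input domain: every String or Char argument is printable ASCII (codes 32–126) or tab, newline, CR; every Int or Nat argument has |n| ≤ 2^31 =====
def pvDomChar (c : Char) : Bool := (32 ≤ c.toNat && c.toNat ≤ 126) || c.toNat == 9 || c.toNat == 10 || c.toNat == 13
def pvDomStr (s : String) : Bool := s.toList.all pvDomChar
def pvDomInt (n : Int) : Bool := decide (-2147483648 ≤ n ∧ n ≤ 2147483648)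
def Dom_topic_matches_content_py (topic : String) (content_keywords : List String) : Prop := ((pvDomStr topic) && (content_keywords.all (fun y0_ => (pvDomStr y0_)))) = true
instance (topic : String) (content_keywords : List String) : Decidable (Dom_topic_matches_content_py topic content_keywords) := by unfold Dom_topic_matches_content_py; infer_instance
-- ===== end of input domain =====

-- B drops A's first two phases (word membership, exact match), which are implied by the
-- bidirectional substring scan; one loop instead of three. Equivalence on all inputs.

-- ===== PORT A =====
def topic_matches_content_py (topic : String) (content_keywords : List String) : Bool :=
  -- topic_words = topic.lower().split(); for word in topic_words: if word in content_keywords: return True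
  if (PySem.Str.split₀ (PySem.Str.lower topic)).any (fun word => content_keywords.contains word) then true
  -- if topic.lower() in content_keywords: return True
  else if content_keywords.contains (PySem.Str.lower topic) then true
  -- for keyword in content_keywords: if topic.lower() in keyword or keyword in topic.lower(): return True
  else if content_keywords.any (fun keyword =>
      PySem.Str.isIn (PySem.Str.lower topic) keyword || PySem.Str.isIn keyword (PySem.Str.lower topic)) then true
  else false

-- ===== PORT B =====
def topic_matches_content_py_alt (topic : String) (content_keywords : List String) : Bool :=
  let t := PySem.Str.lower topic
  content_keywords.any (fun kw => PySem.Str.isIn t kw || PySem.Str.isIn kw t)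

-- ===== PRECONDITION & SPEC =====
def Spec_topic_matches_content_py (topic : String) (content_keywords : List String) (out : Bool) : Prop := out = topic_matches_content_py_alt topic content_keywords
instance (topic : String) (content_keywords : List String) (out : Bool) : Decidable (Spec_topic_matches_content_py topic content_keywords out) := by unfold Spec_topic_matches_content_py; infer_instance

-- ===== CLAIM (what is proved, stated in full; the proofs are below) =====
def Claim_equal_topic_matches_content_py : Prop := ∀ (topic : String) (content_keywords : List String), Dom_topic_matches_content_py topic content_keywords → Spec_topic_matches_content_py topic content_keywords (topic_matches_content_py topic content_keywords)

-- ===== LEMMAS AND PROOFS =====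

-- every word produced by split₀.go is an accumulated word or an infix of cur.reverse ++ s
theorem split0_go_mem_infix (s : List Char) :
    ∀ (cur : List Char) (acc : List (List Char)) (w : List Char),
      w ∈ PySem.Chars.split₀.go s cur acc → w ∈ acc ∨ w <:+: (cur.reverse ++ s) := by
  induction s with
  | nil =>
    intro cur acc w hw
    simp only [PySem.Chars.split₀.go] at hw
    split at hw
    · left; simpa using hw
    · rcases (by simpa using hw : w ∈ acc ∨ w = cur.reverse) with h | h
      · left; exact h
      · right; exact ⟨[], [], by simp [h]⟩
  | cons c rest ih =>
    intro cur acc w hw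
    simp only [PySem.Chars.split₀.go] at hw
    split at hw
    · split at hw
      · rcases ih [] acc w hw with h | h
        · left; exact h
        · right; exact h.trans ⟨cur.reverse ++ [c], [], by simp⟩
      · rcases ih [] (cur.reverse :: acc) w hw with h | h
        · rcases List.mem_cons.mp h with h | h
          · right; exact ⟨[], c :: rest, by simp [h]⟩
          · left; exact h
        · right; exact h.trans ⟨cur.reverse ++ [c], [], by simp⟩
    · rcases ih (c :: cur) acc w hw with h | h
      · left; exact h
      · right
        have : (c :: cur).reverse ++ rest = cur.reverse ++ (c :: rest) := by simp
        rwa [this] at h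

theorem mem_split0_infix (s w : List Char) (hw : w ∈ PySem.Chars.split₀ s) : w <:+: s := by
  rcases split0_go_mem_infix s [] [] w hw with h | h
  · simp at h
  · simpa using h

-- ===== VERDICT (by name: the statement is the Claim_ definition above) =====
theorem topic_matches_content_py_spec : Claim_equal_topic_matches_content_py := by
  intro topic ks _
  show topic_matches_content_py topic ks
      = ks.any (fun kw => PySem.Str.isIn (PySem.Str.lower topic) kw || PySem.Str.isIn kw (PySem.Str.lower topic))
  unfold topic_matches_content_py
  by_cases h1 : ((PySem.Str.split₀ (PySem.Str.lower topic)).any (fun word => ks.contains word)) = true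
  · -- phase 1 fired: some split word is a keyword, hence an infix of the topic, so the scan fires
    rw [if_pos h1]
    rcases List.any_eq_true.mp h1 with ⟨w, hw, hc⟩
    have hwks : w ∈ ks := by simpa using hc
    rcases List.mem_map.mp (by simpa [PySem.Str.split₀] using hw) with ⟨l, hl, hlw⟩
    subst hlw
    have hinf : l <:+: (PySem.Str.lower topic).toList := by
      rw [PySem.Str.toList_lower]; exact mem_split0_infix _ _ hl
    have hf : (PySem.Str.isIn (PySem.Str.lower topic) (String.ofList l)
        || PySem.Str.isIn (String.ofList l) (PySem.Str.lower topic)) = true := by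
      rw [Bool.or_eq_true]; right
      rw [PySem.Str.isIn_iff_infix]; simpa using hinf
    exact (List.any_eq_true.mpr ⟨String.ofList l, hwks, hf⟩).symm
  · rw [if_neg h1]
    by_cases h2 : ks.contains (PySem.Str.lower topic) = true
    · -- phase 2 fired: the whole lowered topic is a keyword, an infix of itself
      rw [if_pos h2]
      have htks : PySem.Str.lower topic ∈ ks := by simpa using h2
      have hf : (PySem.Str.isIn (PySem.Str.lower topic) (PySem.Str.lower topic)
          || PySem.Str.isIn (PySem.Str.lower topic) (PySem.Str.lower topic)) = true := by
        rw [Bool.or_eq_true]; right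
        rw [PySem.Str.isIn_iff_infix]
      exact (List.any_eq_true.mpr ⟨PySem.Str.lower topic, htks, hf⟩).symm
    · rw [if_neg h2]
      cases h3 : ks.any (fun keyword =>
          PySem.Str.isIn (PySem.Str.lower topic) keyword
            || PySem.Str.isIn keyword (PySem.Str.lower topic)) <;> simp
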